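-- pv_equiv track=rewrite | github.com/enyd97/Algorithm | 백준/Silver/1436. 영화감독 숌/영화감독 숌.py | solution
-- ===== SOURCE A (Python) =====
-- def solution(k):
--     temp = 0
--     result = 0
--     while result < k:
--         temp = temp + 1
--         temp_str = str(temp)
--         if '666' in temp_str:
--             result = result + 1
--
--     return temp
-- ===== SOURCE B (Python) =====
-- def _step(s, b):
--     # automaton state s = number of matched chars of "666" (3 = already found, absorbing)
--     if s == 3:
--         return 3
--     return s + 1 if b == 6 else 0
--
--
-- def solution(k):
--     # tables[d][s] = how many length-d digit strings (leading zeros allowed) lead the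
--     # automaton from state s to the accepting state 3, i.e. contain "666" as a substring.
--     tables = [(0, 0, 0, 1)]
--     while tables[-1][0] < k:
--         c0, c1, c2, c3 = tables[-1]
--         tables.append((9 * c0 + c1, 9 * c0 + c2, 9 * c0 + c3, 10 * c3))
--     # Build the k-th smallest accepted number digit by digit (most significant first):
--     # at each position take the smallest digit whose subtree still holds the k-th element.
--     n, s, r = 0, 0, k
--     for d in range(len(tables) - 2, -1, -1):
--         for b in range(10):
--             c = tables[d][_step(s, b)]
--             if r <= c:
--                 n = 10 * n + b
--                 s = _step(s, b)
--                 break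
--             r -= c
--     return n
-- ===== Notes on version B (the rewrite author's own statement) =====
-- stated objective: faster
-- what changed: A scans every integer 1,2,3,... and string-tests each for '666' until the k-th hit; B counts, per digit length, how many digit strings contain '666' via a 4-state automaton DP and then constructs the k-th such number digit by digit, never enumerating numbers.
import Mathlib
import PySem

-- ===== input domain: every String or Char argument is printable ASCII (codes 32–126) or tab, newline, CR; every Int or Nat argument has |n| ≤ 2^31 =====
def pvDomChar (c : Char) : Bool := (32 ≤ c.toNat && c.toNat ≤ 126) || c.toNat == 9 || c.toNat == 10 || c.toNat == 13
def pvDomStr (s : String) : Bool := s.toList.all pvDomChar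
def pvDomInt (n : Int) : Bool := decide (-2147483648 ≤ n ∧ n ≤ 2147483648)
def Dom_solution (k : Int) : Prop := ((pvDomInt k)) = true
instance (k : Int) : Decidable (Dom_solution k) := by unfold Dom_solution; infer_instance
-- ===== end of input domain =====

-- B replaces A's scan of every integer (string-testing each for '666') by a 4-state
-- automaton DP that counts '666'-containing digit strings per length and then builds the
-- k-th such number digit by digit; measurably faster (asymptotically fewer steps).

-- ===== PORT A =====
-- the while loop, one fuel unit per iteration; the fuel (1000*k).toNat only makes the
-- recursion total: it is proved sufficient (the answer is at most 1000*(k-1)+666)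
def solutionGo (k : Int) : Nat → Int → Int → Int
  | 0, temp, _ => temp
  | fuel + 1, temp, result =>
    if result < k then
      let temp' := temp + 1
      let temp_str := PySem.Int.toStr temp'
      if PySem.Str.isIn "666" temp_str then solutionGo k fuel temp' (result + 1)
      else solutionGo k fuel temp' result
    else temp

def solution (k : Int) : Int := solutionGo k (1000 * k).toNat 0 0

-- ===== PORT B =====
def pvStep (s b : Int) : Int := if s == 3 then 3 else if b == 6 then s + 1 else 0

-- tuple indexing tables[d][i] for i = 0..3
def pvIdx (row : Int × Int × Int × Int) (i : Int) : Int :=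
  if i == 0 then row.1 else if i == 1 then row.2.1 else if i == 2 then row.2.2.1 else row.2.2.2

-- the table-building while loop, head of the list = tables[-1]; the fuel k.toNat + 3 only
-- makes the recursion total (proved sufficient: Dmin_bound below)
def solutionAltBuild (k : Int) : Nat → List (Int × Int × Int × Int) → List (Int × Int × Int × Int)
  | 0, rev => rev
  | fuel + 1, rev =>
    match rev with
    | [] => []
    | (c0, c1, c2, c3) :: _ =>
      if c0 < k then
        solutionAltBuild k fuel ((9*c0 + c1, 9*c0 + c2, 9*c0 + c3, 10*c3) :: rev)
      else rev

-- the inner 'for b in range(10)' with break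
def solutionAltInner (row : Int × Int × Int × Int) : List Int → Int → Int → Int → Int × Int × Int
  | [], n, s, r => (n, s, r)
  | b :: bs, n, s, r =>
    let c := pvIdx row (pvStep s b)
    if r ≤ c then (10*n + b, pvStep s b, r)
    else solutionAltInner row bs n s (r - c)

-- the outer 'for d in range(len(tables)-2, -1, -1)' (rows already in that order)
def solutionAltOuter : List (Int × Int × Int × Int) → Int → Int → Int → Int
  | [], n, _, _ => n
  | row :: rows, n, s, r =>
    match solutionAltInner row (PySem.List.pyRange 0 10 1) n s r with
    | (n', s', r') => solutionAltOuter rows n' s' r'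

def solution_alt (k : Int) : Int :=
  let rev := solutionAltBuild k (k.toNat + 3) [(0, 0, 0, 1)]
  solutionAltOuter rev.tail 0 0 k

-- ===== PRECONDITION & SPEC =====
def Spec_solution (k : Int) (out : Int) : Prop := out = solution_alt k
instance (k : Int) (out : Int) : Decidable (Spec_solution k out) := by unfold Spec_solution; infer_instance

-- ===== CLAIM (what is proved, stated in full; the proofs are below) =====
def Claim_equal_solution : Prop := ∀ (k : Int), Dom_solution k → Spec_solution k (solution k)

-- ===== LEMMAS AND PROOFS =====

-- ---- specification-level model: the "contains 666" automaton on big-endian digit lists ----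

def sstep (s b : Nat) : Nat := if s = 3 then 3 else if b = 6 then s + 1 else 0

def srun (s : Nat) (ds : List Nat) : Nat := ds.foldl sstep s

-- big-endian digits of v, zero-padded to length d
def spad : Nat → Nat → List Nat
  | 0, _ => []
  | d + 1, v => v / 10 ^ d :: spad d (v % 10 ^ d)

def accB (s d v : Nat) : Bool := srun s (spad d v) == 3

-- number of accepted v' < u among length-d padded strings, read from state s
def NB (s d u : Nat) : Nat := (List.range u).countP (accB s d)

def FC (s d : Nat) : Nat := NB s d (10 ^ d)

-- naive substring scanner for [6,6,6]
def naive : List Nat → Bool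
  | a :: b :: c :: t => (a == 6 && b == 6 && c == 6) || naive (b :: c :: t)
  | _ => false

def okN (v : Nat) : Bool := naive ((Nat.digits 10 v).reverse)

def cnt (n : Nat) : Nat := (List.range n).countP okN

def rowF (d : Nat) : Int × Int × Int × Int :=
  ((FC 0 d : Int), (FC 1 d : Int), (FC 2 d : Int), (FC 3 d : Int))

def rrows : Nat → List (Int × Int × Int × Int)
  | 0 => []
  | d + 1 => rowF d :: rrows d

def intsFrom (j : Nat) : List Int := (List.range' j (10 - j)).map (fun x => (x : Int))

-- ---- automaton vs naive scanner vs substring ----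

theorem srun_cons (s b : Nat) (ds : List Nat) : srun s (b :: ds) = srun (sstep s b) ds := rfl

theorem srun_three (ds : List Nat) : srun 3 ds = 3 := by
  induction ds with
  | nil => rfl
  | cons b t ih => rw [srun_cons]; simpa [sstep] using ih

theorem naive_cons_of_true (a : Nat) {t : List Nat} (h : naive t = true) :
    naive (a :: t) = true := by
  match t with
  | [] => simp [naive] at h
  | [x] => simp [naive] at h
  | b :: c :: t' => simp [naive, h]

theorem naive_drop1 {a : Nat} (h : a ≠ 6) (t : List Nat) : naive (a :: t) = naive t := by
  match t with
  | [] => simp [naive]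
  | [x] => simp [naive]
  | b :: c :: t' => simp [naive, h]

theorem naive_drop6 {b : Nat} (h : b ≠ 6) (t : List Nat) : naive (6 :: b :: t) = naive (b :: t) := by
  match t with
  | [] => simp [naive]
  | c :: t' => simp [naive, h]

theorem naive_drop66 {b : Nat} (h : b ≠ 6) (t : List Nat) :
    naive (6 :: 6 :: b :: t) = naive (6 :: b :: t) := by
  simp [naive, h]

theorem naive_iff_infix (ds : List Nat) : naive ds = true ↔ [6, 6, 6] <:+: ds := by
  induction ds with
  | nil => simp [naive]
  | cons a t ih =>
    rw [List.infix_cons_iff, ← ih]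
    match t with
    | [] =>
      simp only [naive, Bool.false_eq_true, false_iff]
      push Not
      constructor
      · intro h; have := h.length_le; simp at this
      · simp [naive]
    | [x] =>
      simp only [naive, Bool.false_eq_true, false_iff]
      push Not
      constructor
      · intro h; have := h.length_le; simp at this
      · simp [naive]
    | b :: c :: t' =>
      show ((a == 6 && b == 6 && c == 6) || naive (b :: c :: t')) = true ↔ _
      constructor
      · intro h
        simp only [Bool.or_eq_true, Bool.and_eq_true, beq_iff_eq] at h
        rcases h with ⟨⟨h1, h2⟩, h3⟩ | h
        · subst h1; subst h2; subst h3
          exact Or.inl ⟨t', rfl⟩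
        · exact Or.inr h
      · rintro (h | h)
        · obtain ⟨r, hr⟩ := h
          cases hr
          simp [naive]
        · simp [h]

theorem naive_append_666 (l : List Nat) : naive (l ++ [6, 6, 6]) = true := by
  induction l with
  | nil => rfl
  | cons a t ih => exact naive_cons_of_true a ih

theorem run_naive (ds : List Nat) : ∀ s : Nat, s ≤ 2 →
    ((srun s ds = 3) ↔ naive (List.replicate s 6 ++ ds) = true) := by
  induction ds with
  | nil =>
    intro s hs
    interval_cases s <;> simp [srun, naive]
  | cons b t ih =>
    intro s hs
    rw [srun_cons]
    by_cases hb : b = 6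
    · subst hb
      by_cases hs2 : s = 2
      · subst hs2
        have h1 : sstep 2 6 = 3 := rfl
        rw [h1, srun_three]
        simp [List.replicate, naive]
      · have h1 : sstep s 6 = s + 1 := by simp [sstep]; omega
        have h2 : List.replicate s 6 ++ 6 :: t = List.replicate (s + 1) 6 ++ t := by
          rw [List.replicate_succ']; simp
        rw [h1, ih (s + 1) (by omega), h2]
    · have h1 : sstep s b = 0 := by simp [sstep, hb]; omega
      rw [h1, ih 0 (by omega)]
      simp only [List.replicate_zero, List.nil_append]
      have h3 : naive (List.replicate s 6 ++ b :: t) = naive t := by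
        interval_cases s
        · simp [naive_drop1 hb]
        · show naive (6 :: b :: t) = naive t
          rw [naive_drop6 hb, naive_drop1 hb]
        · show naive (6 :: 6 :: b :: t) = naive t
          rw [naive_drop66 hb, naive_drop6 hb, naive_drop1 hb]
      rw [h3]

-- ---- padding ----

theorem spad_eq (d : Nat) : ∀ v : Nat, v < 10 ^ d →
    spad d v = List.replicate (d - (Nat.digits 10 v).length) 0 ++ (Nat.digits 10 v).reverse := by
  induction d with
  | zero =>
    intro v hv
    interval_cases v
    simp [spad]
  | succ d ih =>
    intro v hv
    show v / 10 ^ d :: spad d (v % 10 ^ d) = _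
    by_cases h : v < 10 ^ d
    · have hq : v / 10 ^ d = 0 := Nat.div_eq_of_lt h
      have hr : v % 10 ^ d = v := Nat.mod_eq_of_lt h
      have hL : (Nat.digits 10 v).length ≤ d := (Nat.digits_length_le_iff (by omega) v).mpr h
      rw [hq, hr, ih v h]
      have : d + 1 - (Nat.digits 10 v).length = (d - (Nat.digits 10 v).length) + 1 := by omega
      rw [this, List.replicate_succ, List.cons_append]
    · -- 10^d ≤ v < 10^(d+1)
      set q := v / 10 ^ d with hq
      set r := v % 10 ^ d with hr
      have hten : (0:Nat) < 10 ^ d := Nat.pow_pos (by omega)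
      have hq1 : 1 ≤ q := by
        rw [hq]; exact Nat.one_le_div_iff hten |>.mpr (by omega)
      have hq9 : q < 10 := by
        rw [hq]
        have : v < 10 * 10 ^ d := by rw [pow_succ] at hv; omega
        exact Nat.div_lt_of_lt_mul (by omega)
      have hrlt : r < 10 ^ d := Nat.mod_lt _ hten
      have hLr : (Nat.digits 10 r).length ≤ d := (Nat.digits_length_le_iff (by omega) r).mpr hrlt
      have hv_eq : v = r + 10 ^ ((Nat.digits 10 r).length + (d - (Nat.digits 10 r).length)) * q := by
        have : (Nat.digits 10 r).length + (d - (Nat.digits 10 r).length) = d := by omega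
        rw [this]
        have hmd := Nat.mod_add_div v (10 ^ d)
        rw [hr, hq]
        omega
      have hdig : Nat.digits 10 v =
          Nat.digits 10 r ++ List.replicate (d - (Nat.digits 10 r).length) 0 ++ Nat.digits 10 q := by
        rw [Nat.digits_append_zeroes_append_digits (by omega) (by omega), ← hv_eq]
      have hdq : Nat.digits 10 q = [q] := Nat.digits_of_lt 10 q (by omega) (by omega)
      have hlen : (Nat.digits 10 v).length = d + 1 := by
        rw [hdig, hdq]; simp; omega
      rw [hlen]
      simp only [Nat.add_sub_cancel_left, Nat.sub_self]
      rw [hdig, hdq, ih r hrlt]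
      simp [List.reverse_append]

theorem srun_zero_replicate (z : Nat) (l : List Nat) :
    srun 0 (List.replicate z 0 ++ l) = srun 0 l := by
  induction z with
  | zero => rfl
  | succ z ih => rw [List.replicate_succ, List.cons_append, srun_cons]; simpa [sstep] using ih

theorem acc0_okN {d v : Nat} (h : v < 10 ^ d) : accB 0 d v = okN v := by
  unfold accB okN
  rw [spad_eq d v h, srun_zero_replicate, Bool.eq_iff_iff, beq_iff_eq]
  have h1 := run_naive ((Nat.digits 10 v).reverse) 0 (by omega)
  simpa using h1

theorem acc_split {d w : Nat} (s b : Nat) (hw : w < 10 ^ d) :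
    accB s (d + 1) (b * 10 ^ d + w) = accB (sstep s b) d w := by
  unfold accB
  have hpos : 0 < 10 ^ d := Nat.pow_pos (by omega)
  have hq : (b * 10 ^ d + w) / 10 ^ d = b := by
    rw [add_comm, Nat.add_mul_div_right w b hpos, Nat.div_eq_of_lt hw, Nat.zero_add]
  have hr : (b * 10 ^ d + w) % 10 ^ d = w := by
    rw [add_comm, Nat.add_mul_mod_self_right, Nat.mod_eq_of_lt hw]
  show (srun s ((b * 10 ^ d + w) / 10 ^ d :: spad d ((b * 10 ^ d + w) % 10 ^ d)) == 3) = _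
  rw [hq, hr, srun_cons]

-- ---- counting ----

theorem NB_shift (s D x w : Nat) :
    NB s D (x + w) = NB s D x + (List.range w).countP (fun w' => accB s D (x + w')) := by
  unfold NB
  rw [List.range_add, List.countP_append, List.countP_map]
  rfl

theorem NB_block (s d : Nat) : ∀ b : Nat,
    NB s (d + 1) (b * 10 ^ d) = ∑ b' ∈ Finset.range b, FC (sstep s b') d := by
  intro b
  induction b with
  | zero => simp [NB]
  | succ b ih =>
    have h1 : (b + 1) * 10 ^ d = b * 10 ^ d + 10 ^ d := by ring
    rw [h1, NB_shift, ih, Finset.sum_range_succ]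
    congr 1
    rw [show (List.range (10 ^ d)).countP (fun w' => accB s (d + 1) (b * 10 ^ d + w'))
        = (List.range (10 ^ d)).countP (accB (sstep s b) d) from
      List.countP_congr (by
        intro w' hw'
        rw [List.mem_range] at hw'
        rw [acc_split s b hw'])]
    rfl

theorem NB_split {d w : Nat} (s b : Nat) (hw : w ≤ 10 ^ d) :
    NB s (d + 1) (b * 10 ^ d + w) =
      (∑ b' ∈ Finset.range b, FC (sstep s b') d) + NB (sstep s b) d w := by
  rw [NB_shift, NB_block]
  congr 1
  rw [show (List.range w).countP (fun w' => accB s (d + 1) (b * 10 ^ d + w'))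
      = (List.range w).countP (accB (sstep s b) d) from
    List.countP_congr (by
      intro w' hw'
      rw [List.mem_range] at hw'
      rw [acc_split s b (by omega)])]
  rfl

theorem FC_zero (s : Nat) : FC s 0 = if s = 3 then 1 else 0 := by
  show (List.range 1).countP (accB s 0) = _
  simp only [List.range_succ, List.range_zero, List.nil_append, List.countP_cons,
    List.countP_nil]
  unfold accB spad srun
  simp only [List.foldl_nil, beq_iff_eq]
  split_ifs <;> simp_all

theorem FC_succ (s d : Nat) : FC s (d + 1) = ∑ b ∈ Finset.range 10, FC (sstep s b) d := by
  have h1 : (10 : Nat) ^ (d + 1) = 10 * 10 ^ d + 0 := by ring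
  show NB s (d + 1) (10 ^ (d + 1)) = _
  rw [h1, NB_split s 10 (by omega)]
  simp [NB]

theorem FC0_succ (d : Nat) : FC 0 (d + 1) = 9 * FC 0 d + FC 1 d := by
  rw [FC_succ]
  simp only [Finset.sum_range_succ, Finset.sum_range_zero]
  norm_num [sstep]
  ring
theorem FC1_succ (d : Nat) : FC 1 (d + 1) = 9 * FC 0 d + FC 2 d := by
  rw [FC_succ]
  simp only [Finset.sum_range_succ, Finset.sum_range_zero]
  norm_num [sstep]
  ring
theorem FC2_succ (d : Nat) : FC 2 (d + 1) = 9 * FC 0 d + FC 3 d := by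
  rw [FC_succ]
  simp only [Finset.sum_range_succ, Finset.sum_range_zero]
  norm_num [sstep]
  ring
theorem FC3_succ (d : Nat) : FC 3 (d + 1) = 10 * FC 3 d := by
  rw [FC_succ]
  simp only [Finset.sum_range_succ, Finset.sum_range_zero]
  norm_num [sstep]
  ring

theorem FC3_eq (d : Nat) : FC 3 d = 10 ^ d := by
  induction d with
  | zero => rw [FC_zero]; rfl
  | succ d ih => rw [FC3_succ, ih]; ring

theorem FC2_ge (d : Nat) : 10 ^ d ≤ FC 2 (d + 1) := by
  rw [FC2_succ, FC3_eq]; omega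

theorem FC1_ge (d : Nat) : 10 ^ d ≤ FC 1 (d + 2) := by
  have := FC2_ge d
  rw [show d + 2 = (d + 1) + 1 from rfl, FC1_succ]
  omega

theorem FC0_ge (d : Nat) : 10 ^ d ≤ FC 0 (d + 3) := by
  have := FC1_ge d
  rw [show d + 3 = (d + 2) + 1 from rfl, FC0_succ]
  omega

-- ---- global count cnt ----

theorem cnt_succ (n : Nat) : cnt (n + 1) = cnt n + if okN n then 1 else 0 := by
  unfold cnt
  rw [List.range_succ, List.countP_append]
  simp [List.countP_cons]

theorem cnt_mono {a b : Nat} (h : a ≤ b) : cnt a ≤ cnt b := by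
  unfold cnt
  obtain ⟨c, rfl⟩ := Nat.exists_eq_add_of_le h
  rw [List.range_add, List.countP_append]
  omega

theorem okN_1000 (j : Nat) : okN (1000 * j + 666) = true := by
  have h1 : Nat.digits 10 (1000 * j + 666) = 6 :: Nat.digits 10 (100 * j + 66) := by
    have e1 : (1000 * j + 666) % 10 = 6 := by omega
    have e2 : (1000 * j + 666) / 10 = 100 * j + 66 := by omega
    rw [Nat.digits_def' (b := 10) (by omega) (by omega), e1, e2]
  have h2 : Nat.digits 10 (100 * j + 66) = 6 :: Nat.digits 10 (10 * j + 6) := by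
    have e1 : (100 * j + 66) % 10 = 6 := by omega
    have e2 : (100 * j + 66) / 10 = 10 * j + 6 := by omega
    rw [Nat.digits_def' (b := 10) (by omega) (by omega), e1, e2]
  have h3 : Nat.digits 10 (10 * j + 6) = 6 :: Nat.digits 10 j := by
    have e1 : (10 * j + 6) % 10 = 6 := by omega
    have e2 : (10 * j + 6) / 10 = j := by omega
    rw [Nat.digits_def' (b := 10) (by omega) (by omega), e1, e2]
  unfold okN
  rw [h1, h2, h3]
  simp only [List.reverse_cons, List.append_assoc]
  rw [show ([6] ++ ([6] ++ [6]) : List Nat) = [6, 6, 6] from rfl]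
  exact naive_append_666 _

theorem cnt_lb (m : Nat) : m + 1 ≤ cnt (1000 * m + 667) := by
  induction m with
  | zero =>
    show 1 ≤ cnt 667
    have : 0 < (List.range 667).countP okN := by
      rw [List.countP_pos_iff]
      refine ⟨666, by simp, ?_⟩
      have := okN_1000 0
      norm_num at this
      exact this
    exact this
  | succ m ih =>
    have e1 : cnt (1000 * m + 1667) = cnt (1000 * m + 1666) + 1 := by
      have h1 := cnt_succ (1000 * m + 1666)
      have h2 : okN (1000 * m + 1666) = true := by
        have := okN_1000 (m + 1)
        rw [show 1000 * (m + 1) + 666 = 1000 * m + 1666 from by ring] at this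
        exact this
      rw [h2] at h1
      rw [show 1000 * m + 1666 + 1 = 1000 * m + 1667 from by ring] at h1
      simpa using h1
    have e2 : cnt (1000 * m + 667) ≤ cnt (1000 * m + 1666) := cnt_mono (by omega)
    have e3 : cnt (1000 * (m + 1) + 667) = cnt (1000 * m + 1667) := by rw [show 1000 * (m + 1) + 667 = 1000 * m + 1667 from by ring]
    omega

theorem cnt_ex (K : Nat) : ∃ t, K ≤ cnt (t + 1) :=
  ⟨1000 * K + 666, le_trans (by omega) (cnt_lb K)⟩

def NthA (K : Nat) : Nat := Nat.find (cnt_ex K)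

theorem NthA_spec (K : Nat) : K ≤ cnt (NthA K + 1) := Nat.find_spec (cnt_ex K)

theorem NthA_le {K t : Nat} (h : K ≤ cnt (t + 1)) : NthA K ≤ t := Nat.find_le h

theorem NB0_cnt {d u : Nat} (h : u ≤ 10 ^ d) : NB 0 d u = cnt u := by
  unfold NB cnt
  refine List.countP_congr ?_
  intro v hv
  rw [List.mem_range] at hv
  rw [acc0_okN (by omega)]

-- ---- the A loop ----

theorem go_stop (k : Int) (fuel : Nat) (temp res : Int) (h : ¬ res < k) :
    solutionGo k fuel temp res = temp := by
  cases fuel <;> simp [solutionGo, h]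

theorem toDigitsCore_digits : ∀ (fuel n : Nat) (l : List Char), 0 < n → n < fuel →
    Nat.toDigitsCore 10 fuel n l = ((Nat.digits 10 n).reverse.map Nat.digitChar) ++ l := by
  intro fuel
  induction fuel with
  | zero => intro n l h1 h2; omega
  | succ f ih =>
    intro n l h1 h2
    rw [Nat.toDigitsCore]
    by_cases h : n / 10 = 0
    · simp only [h, if_true]
      have hn : n < 10 := by omega
      rw [Nat.digits_of_lt 10 n (by omega) hn]
      simp [Nat.mod_eq_of_lt hn]
    · simp only [h, if_false]
      rw [ih (n / 10) _ (by omega) (by omega)]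
      rw [Nat.digits_def' (by norm_num) h1]
      simp

theorem infix_map_digitChar {ds : List Nat} (h : ∀ x ∈ ds, x < 10) :
    (['6', '6', '6'] <:+: ds.map Nat.digitChar) ↔ [6, 6, 6] <:+: ds := by
  constructor
  · intro hinf
    have h2 := hinf.map (fun c => c.toNat - 48)
    simp only [List.map_map] at h2
    have h3 : ds.map ((fun c => c.toNat - 48) ∘ Nat.digitChar) = ds := by
      have hx : ∀ x ∈ ds, ((fun c : Char => c.toNat - 48) ∘ Nat.digitChar) x = id x := by
        intro x hx
        have := h x hx
        interval_cases x <;> rfl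
      rw [List.map_congr_left hx, List.map_id]
    rw [h3] at h2
    exact h2
  · intro hinf
    have := hinf.map Nat.digitChar
    exact this

theorem isIn_toStr (t : Nat) :
    PySem.Str.isIn "666" (PySem.Int.toStr ((t : Nat) : Int)) = okN t := by
  by_cases ht : t = 0
  · subst ht; decide
  · have hchars : (PySem.Int.toStr ((t : Nat) : Int)).toList
        = (Nat.digits 10 t).reverse.map Nat.digitChar := by
      rw [PySem.Int.toList_toStr]
      unfold PySem.Int.toChars
      rw [if_neg (by omega)]
      have h1 : ((t : Int)).toNat = t := rfl
      rw [h1]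
      show Nat.toDigitsCore 10 (t + 1) t [] = _
      rw [toDigitsCore_digits (t + 1) t [] (by omega) (by omega), List.append_nil]
    rw [Bool.eq_iff_iff, PySem.Str.isIn_iff_infix, hchars]
    have hd : ∀ x ∈ (Nat.digits 10 t).reverse, x < 10 := by
      intro x hx
      rw [List.mem_reverse] at hx
      exact Nat.digits_lt_base (by omega) hx
    show (['6','6','6'] <:+: _) ↔ _
    rw [infix_map_digitChar hd]
    unfold okN
    rw [naive_iff_infix]

theorem GA (K : Nat) (hK : 1 ≤ K) : ∀ (fuel : Nat) (t : Nat),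
    cnt (t + 1) < K → NthA K ≤ t + fuel →
    solutionGo ((K : Nat) : Int) fuel ((t : Nat) : Int) ((cnt (t + 1) : Nat) : Int)
      = ((NthA K : Nat) : Int) := by
  intro fuel
  induction fuel with
  | zero =>
    intro t h1 h2
    exfalso
    have h3 : cnt (NthA K + 1) ≤ cnt (t + 1) := cnt_mono (by omega)
    have h4 := NthA_spec K
    omega
  | succ f ih =>
    intro t h1 h2
    have hlt : ((cnt (t + 1) : Nat) : Int) < ((K : Nat) : Int) := by exact_mod_cast h1
    have hcast : ((t : Nat) : Int) + 1 = (((t + 1 : Nat)) : Int) := by push_cast; ring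
    simp only [solutionGo, if_pos hlt, hcast, isIn_toStr (t + 1)]
    cases ha : okN (t + 1) with
    | true =>
      have hc : cnt (t + 2) = cnt (t + 1) + 1 := by rw [cnt_succ, ha]; simp
      have hargs : ((cnt (t + 1) : Nat) : Int) + 1 = ((cnt (t + 2) : Nat) : Int) := by
        rw [hc]; push_cast; ring
      rw [if_pos rfl, hargs]
      by_cases h4 : cnt (t + 2) < K
      · have := ih (t + 1) (by omega) (by omega)
        rw [show t + 1 + 1 = t + 2 from rfl] at this
        exact this
      · rw [go_stop _ f _ _ (by push_cast; omega)]
        have h5 : NthA K ≤ t + 1 := NthA_le (by rw [show t + 1 + 1 = t + 2 from rfl]; omega)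
        have h6 : ¬ NthA K ≤ t := by
          intro h
          have h7 : cnt (NthA K + 1) ≤ cnt (t + 1) := cnt_mono (by omega)
          have h8 := NthA_spec K
          omega
        have : NthA K = t + 1 := by omega
        rw [this]
    | false =>
      have hc : cnt (t + 2) = cnt (t + 1) := by rw [cnt_succ, ha]; simp
      rw [if_neg (by simp)]
      have := ih (t + 1) (by rw [show t + 1 + 1 = t + 2 from rfl]; omega) (by omega)
      rw [show t + 1 + 1 = t + 2 from rfl, hc] at this
      exact this

theorem NthA_bound (K : Nat) (hK : 1 ≤ K) : NthA K ≤ 1000 * (K - 1) + 666 := by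
  refine NthA_le ?_
  have := cnt_lb (K - 1)
  rw [show 1000 * (K - 1) + 666 + 1 = 1000 * (K - 1) + 667 from rfl]
  omega

theorem okN_zero : okN 0 = false := by
  unfold okN
  simp [naive]

theorem cnt_one : cnt 1 = 0 := by
  simp [cnt, List.range_one, List.countP_cons, okN_zero]

theorem solution_eq (K : Nat) (hK : 1 ≤ K) : solution ((K : Nat) : Int) = ((NthA K : Nat) : Int) := by
  unfold solution
  have hfuel : (1000 * ((K : Nat) : Int)).toNat = 1000 * K := by
    rw [show (1000 : Int) * (K : Int) = ((1000 * K : Nat) : Int) from by push_cast; ring]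
    omega
  have h1 := GA K hK (1000 * K) 0 (by rw [show (0:Nat) + 1 = 1 from rfl, cnt_one]; omega)
    (by have := NthA_bound K hK; omega)
  rw [show (0:Nat) + 1 = 1 from rfl, cnt_one] at h1
  rw [hfuel]
  exact h1

-- ---- the B construction ----

theorem F0_ex (K : Nat) : ∃ d, K ≤ FC 0 d := by
  refine ⟨K + 3, le_trans ?_ (FC0_ge K)⟩
  have := Nat.lt_pow_self (a := 10) (n := K) (by omega)
  omega

def Dmin (K : Nat) : Nat := Nat.find (F0_ex K)

theorem Dmin_spec (K : Nat) : K ≤ FC 0 (Dmin K) := Nat.find_spec (F0_ex K)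

theorem Dmin_le {K d : Nat} (h : K ≤ FC 0 d) : Dmin K ≤ d := Nat.find_le h

theorem sstep_le {s : Nat} (b : Nat) (hs : s ≤ 3) : sstep s b ≤ 3 := by
  unfold sstep; split_ifs <;> omega

theorem pvStep_cast (s b : Nat) : pvStep ((s : Nat) : Int) ((b : Nat) : Int) = ((sstep s b : Nat) : Int) := by
  simp only [pvStep, sstep, beq_iff_eq]
  split_ifs with h1 h2 h3 h4 h5 h6 <;> push_cast <;> omega

theorem pvIdx_rowF (d : Nat) (j : Nat) (hj : j ≤ 3) :
    pvIdx (rowF d) ((j : Nat) : Int) = ((FC j d : Nat) : Int) := by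
  interval_cases j <;> simp [pvIdx, rowF]

theorem intsFrom_cons {j : Nat} (h : j < 10) : intsFrom j = (j : Int) :: intsFrom (j + 1) := by
  unfold intsFrom
  have : 10 - j = (10 - (j + 1)) + 1 := by omega
  rw [this, List.range'_succ]
  rfl

theorem pyRange_eq_intsFrom : PySem.List.pyRange 0 10 1 = intsFrom 0 := by decide

theorem INNER (d : Nat) : ∀ (m j : Nat), j + m = 10 → ∀ (n : Int) (s r : Nat), s ≤ 3 → 1 ≤ r →
    r ≤ ∑ b ∈ Finset.Ico j 10, FC (sstep s b) d →
    ∃ (b r' : Nat), j ≤ b ∧ b < 10 ∧ 1 ≤ r' ∧ r' ≤ FC (sstep s b) d ∧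
      (∑ b'' ∈ Finset.Ico j b, FC (sstep s b'') d) + r' = r ∧
      solutionAltInner (rowF d) (intsFrom j) n ((s : Nat) : Int) ((r : Nat) : Int)
        = (10 * n + ((b : Nat) : Int), ((sstep s b : Nat) : Int), ((r' : Nat) : Int)) := by
  intro m
  induction m with
  | zero =>
    intro j hj n s r hs hr hle
    exfalso
    have hj10 : j = 10 := by omega
    subst hj10
    simp at hle
    omega
  | succ m ih =>
    intro j hj n s r hs hr hle
    have hj10 : j < 10 := by omega
    have hstep := pvStep_cast s j
    have hidx := pvIdx_rowF d (sstep s j) (sstep_le j hs)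
    by_cases hc : r ≤ FC (sstep s j) d
    · refine ⟨j, r, le_refl j, hj10, hr, hc, by simp, ?_⟩
      rw [intsFrom_cons hj10]
      simp only [solutionAltInner, hstep, hidx]
      rw [if_pos (by exact_mod_cast hc)]
    · have hsum : ∑ b ∈ Finset.Ico j 10, FC (sstep s b) d
          = FC (sstep s j) d + ∑ b ∈ Finset.Ico (j + 1) 10, FC (sstep s b) d :=
        Finset.sum_eq_sum_Ico_succ_bot hj10 _
      obtain ⟨b, r', hb1, hb2, hr1, hr2, hsum2, heq⟩ :=
        ih (j + 1) (by omega) n s (r - FC (sstep s j) d) hs (by omega) (by omega)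
      refine ⟨b, r', by omega, hb2, hr1, hr2, ?_, ?_⟩
      · rw [Finset.sum_eq_sum_Ico_succ_bot (by omega : j < b) _]
        omega
      · rw [intsFrom_cons hj10]
        simp only [solutionAltInner, hstep, hidx]
        rw [if_neg (by push_cast; omega)]
        rw [show ((r : Nat) : Int) - ((FC (sstep s j) d : Nat) : Int)
            = (((r - FC (sstep s j) d : Nat)) : Int) from by push_cast; omega]
        exact heq

theorem SEL (d : Nat) : ∀ (n : Int) (s r : Nat), s ≤ 3 → 1 ≤ r → r ≤ FC s d →
    ∃ m : Nat, m < 10 ^ d ∧ accB s d m = true ∧ NB s d m = r - 1 ∧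
      solutionAltOuter (rrows d) n ((s : Nat) : Int) ((r : Nat) : Int) = n * 10 ^ d + (m : Int) := by
  induction d with
  | zero =>
    intro n s r hs hr hle
    rw [FC_zero] at hle
    by_cases hs3 : s = 3
    · subst hs3
      norm_num at hle
      have hr1 : r = 1 := by omega
      subst hr1
      refine ⟨0, by norm_num, by decide, by simp [NB], ?_⟩
      show solutionAltOuter [] n 3 1 = n * 10 ^ 0 + 0
      simp [solutionAltOuter]
    · rw [if_neg hs3] at hle
      omega
  | succ d ihd =>
    intro n s r hs hr hle
    have hsum : r ≤ ∑ b ∈ Finset.Ico 0 10, FC (sstep s b) d := by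
      rw [← Finset.range_eq_Ico, ← FC_succ]
      exact hle
    obtain ⟨b, r', hb0, hb10, hr'1, hr'2, hsum2, heq⟩ := INNER d 10 0 rfl n s r hs hr hsum
    obtain ⟨m', hm'1, hm'2, hm'3, hout⟩ :=
      ihd (10 * n + ((b : Nat) : Int)) (sstep s b) r' (sstep_le b hs) hr'1 hr'2
    refine ⟨b * 10 ^ d + m', ?_, ?_, ?_, ?_⟩
    · calc b * 10 ^ d + m' < b * 10 ^ d + 10 ^ d := by omega
        _ = (b + 1) * 10 ^ d := by ring
        _ ≤ 10 * 10 ^ d := Nat.mul_le_mul_right _ (by omega)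
        _ = 10 ^ (d + 1) := by ring
    · rw [acc_split s b hm'1]
      exact hm'2
    · rw [NB_split s b (le_of_lt hm'1), hm'3, Finset.range_eq_Ico]
      omega
    · show solutionAltOuter (rowF d :: rrows d) n ((s : Nat) : Int) ((r : Nat) : Int) = _
      simp only [solutionAltOuter, pyRange_eq_intsFrom, heq]
      rw [hout]
      push_cast
      ring

theorem BUILD (K : Nat) (hK : 1 ≤ K) : ∀ (fuel d : Nat), d ≤ Dmin K → Dmin K ≤ d + fuel →
    solutionAltBuild ((K : Nat) : Int) fuel (rowF d :: rrows d) = rowF (Dmin K) :: rrows (Dmin K) := by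
  intro fuel
  induction fuel with
  | zero =>
    intro d h1 h2
    have hd : d = Dmin K := by omega
    rw [hd]
    rfl
  | succ f ih =>
    intro d h1 h2
    rw [show (rowF d :: rrows d)
        = ((((FC 0 d : Nat) : Int), ((FC 1 d : Nat) : Int), ((FC 2 d : Nat) : Int),
            ((FC 3 d : Nat) : Int)) :: rrows d) from rfl]
    by_cases hc : FC 0 d < K
    · have hrow : ((9 * ((FC 0 d : Nat) : Int) + ((FC 1 d : Nat) : Int),
          9 * ((FC 0 d : Nat) : Int) + ((FC 2 d : Nat) : Int),
          9 * ((FC 0 d : Nat) : Int) + ((FC 3 d : Nat) : Int),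
          10 * ((FC 3 d : Nat) : Int)) : Int × Int × Int × Int) = rowF (d + 1) := by
        unfold rowF
        rw [FC0_succ, FC1_succ, FC2_succ, FC3_succ]
        push_cast
        ring_nf
      simp only [solutionAltBuild]
      rw [if_pos (by exact_mod_cast hc), hrow]
      have hne : d ≠ Dmin K := by
        intro h
        have hsp := Dmin_spec K
        rw [h] at hc
        omega
      have hrr : ((((FC 0 d : Nat) : Int), ((FC 1 d : Nat) : Int), ((FC 2 d : Nat) : Int),
          ((FC 3 d : Nat) : Int)) :: rrows d) = rrows (d + 1) := rfl
      rw [hrr]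
      exact ih (d + 1) (by omega) (by omega)
    · simp only [solutionAltBuild]
      rw [if_neg (by exact_mod_cast hc)]
      have hd : d = Dmin K := by
        have := Dmin_le (show K ≤ FC 0 d from by omega)
        omega
      rw [hd]
      rfl

theorem Dmin_bound (K : Nat) (hK : 1 ≤ K) : Dmin K ≤ K + 2 := by
  have h1 := FC0_ge (K - 1)
  rw [show K - 1 + 3 = K + 2 from by omega] at h1
  have h2 : K - 1 < 10 ^ (K - 1) := Nat.lt_pow_self (by omega)
  exact Dmin_le (by omega)

theorem solution_alt_eq (K : Nat) (hK : 1 ≤ K) :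
    solution_alt ((K : Nat) : Int) = ((NthA K : Nat) : Int) := by
  unfold solution_alt
  have hfuel : ((K : Nat) : Int).toNat + 3 = K + 3 := by omega
  have hbase : ([((0 : Int), (0 : Int), (0 : Int), (1 : Int))]) = rowF 0 :: rrows 0 := by
    simp [rowF, FC_zero, rrows]
  rw [hfuel, hbase, BUILD K hK (K + 3) 0 (by omega) (by have := Dmin_bound K hK; omega)]
  obtain ⟨m, hm1, hm2, hm3, hout⟩ :=
    SEL (Dmin K) (0 : Int) 0 K (by omega) hK (Dmin_spec K)
  show solutionAltOuter (rrows (Dmin K)) 0 ((0 : Nat) : Int) ((K : Nat) : Int) = _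
  rw [hout]
  have hcm : cnt m = K - 1 := by rw [← NB0_cnt (le_of_lt hm1), hm3]
  have hok : okN m = true := by rw [← acc0_okN hm1, hm2]
  have hc1 : cnt (m + 1) = K := by rw [cnt_succ, hok]; simp; omega
  have h5 : NthA K ≤ m := NthA_le (by omega)
  have h6 : ¬ NthA K < m := by
    intro h
    have h7 : cnt (NthA K + 1) ≤ cnt m := cnt_mono (by omega)
    have h8 := NthA_spec K
    omega
  have : m = NthA K := by omega
  rw [this]
  push_cast
  ring

-- ===== VERDICT (by name: the statement is the Claim_ definition above) =====
theorem solution_spec : Claim_equal_solution := by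
  intro k _
  unfold Spec_solution
  by_cases hk : k ≤ 0
  · have hA : solution k = 0 := by
      unfold solution
      exact go_stop k _ 0 0 (by omega)
    have hB : solution_alt k = 0 := by
      unfold solution_alt
      have h0 : k.toNat = 0 := by omega
      rw [h0]
      have hb : solutionAltBuild k (0 + 3) [((0 : Int), 0, 0, 1)] = [((0 : Int), 0, 0, 1)] := by
        rw [show (0 + 3 : Nat) = 2 + 1 from rfl]
        simp only [solutionAltBuild]
        rw [if_neg (by omega)]
      rw [hb]
      rfl
    rw [hA, hB]
  · have h1 : 1 ≤ k.toNat := by omega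
    have hkk : ((k.toNat : Nat) : Int) = k := by omega
    rw [← hkk, solution_eq k.toNat h1, solution_alt_eq k.toNat h1]
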